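-- pv_equiv track=rewrite | github.com/QianShuoRobert/number_md_title | number_md_title.py | remove_md_title_number
-- ===== SOURCE A (Python) =====
-- from typing import List
--
-- def remove_md_title_number(md_content: List[str]) -> List[str]:
--     level = 0
--     for line_number, cur_line in enumerate(md_content):
--         if cur_line.startswith('# '):
--             level = 1
--         elif cur_line.startswith('## '):
--             level = 2
--         elif cur_line.startswith('### '):
--             level = 3
--         elif cur_line.startswith('#### '):
--             level = 4
--         elif cur_line.startswith('##### '):
--             level = 5
--         elif cur_line.startswith('###### '):
--             level = 6
--         else:
--             continue
--         for title_word in range(level + 1, len(cur_line)):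
--             if not cur_line[title_word].isdigit() and not cur_line[title_word] == '.':
--                 md_content[line_number] = f"{cur_line[0:level + 1]}{cur_line[title_word:].lstrip(' ')}"
--                 break
--     return md_content
-- ===== SOURCE B (Python) =====
-- def remove_md_title_number(md_content):
--     for i in range(len(md_content)):
--         md_content[i] = _strip_numbering(md_content[i])
--     return md_content
--
-- def _strip_numbering(line):
--     # one left-to-right pass over the characters: explicit state machine HASH -> NUM -> SP
--     state, hashes, j, n = 0, 0, 0, len(line)   # states: 0=HASH, 1=NUM, 2=SP
--     while j < n:
--         c = line[j]
--         if state == 0: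
--             if c == '#':
--                 hashes += 1
--             elif c == ' ' and 1 <= hashes <= 6:
--                 state = 1
--             else:
--                 return line
--         elif state == 1:
--             if not (c.isdigit() or c == '.'):
--                 state = 2
--                 continue
--         else:
--             if c != ' ':
--                 return '#' * hashes + ' ' + line[j:]
--         j += 1
--     return '#' * hashes + ' ' if state == 2 else line
-- ===== Notes on version B (the rewrite author's own statement) =====
-- stated objective: alternative
-- what changed: Replaces A's six-way startswith level dispatch plus an indexed digit/dot scan with slicing and lstrip by a single left-to-right character pass per line driven by an explicit three-state machine (HASH/NUM/SP) that counts hashes and rebuilds the prefix.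
import Mathlib
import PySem

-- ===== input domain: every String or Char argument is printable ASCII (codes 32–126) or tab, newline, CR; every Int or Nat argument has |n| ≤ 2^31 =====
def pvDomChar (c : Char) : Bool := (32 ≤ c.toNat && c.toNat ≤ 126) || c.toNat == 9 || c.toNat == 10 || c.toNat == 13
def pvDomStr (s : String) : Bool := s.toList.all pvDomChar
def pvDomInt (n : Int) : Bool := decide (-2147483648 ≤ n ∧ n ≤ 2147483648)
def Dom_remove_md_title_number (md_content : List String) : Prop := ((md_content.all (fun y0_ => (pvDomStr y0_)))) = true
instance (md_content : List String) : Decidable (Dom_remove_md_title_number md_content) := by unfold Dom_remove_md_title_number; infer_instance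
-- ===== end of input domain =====

-- B replaces A's six-way startswith level dispatch plus indexed digit/dot scan with slicing and
-- lstrip by a single left-to-right character pass per line driven by an explicit three-state
-- machine (HASH/NUM/SP) that counts hashes and rebuilds the prefix (objective: alternative).
-- Both A and B mutate md_content in place only by reassigning entry i from entry i; the theorem is about the return value.

-- ===== PORT A =====
-- A's inner `for title_word in range(level+1, len(cur_line))` with its break, as recursion on the
-- index list; `.lstrip(' ')` is ported by hand as dropWhile (· == ' ') (exact: drops leading spaces).
-- Returns `some new_line` when the Python loop breaks (reassigns the entry), `none` otherwise.
def pvA_scan (cs : List Char) (level : Nat) : List Int → Option (List Char)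
  | [] => none
  | t :: rest =>
      let c := (PySem.List.pyGet? cs t).getD ' '
      if !(PySem.Chars.isdigit c) && !(c == '.') then
        some (PySem.List.slice cs none (some ((level : Int) + 1)) ++
          (PySem.List.slice cs (some t) none).dropWhile (· == ' '))
      else pvA_scan cs level rest

def pvA_line (line : String) : String :=
  let cs := line.toList
  let level : Nat :=
    if PySem.Chars.startswith cs ['#', ' '] then 1
    else if PySem.Chars.startswith cs ['#', '#', ' '] then 2
    else if PySem.Chars.startswith cs ['#', '#', '#', ' '] then 3
    else if PySem.Chars.startswith cs ['#', '#', '#', '#', ' '] then 4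
    else if PySem.Chars.startswith cs ['#', '#', '#', '#', '#', ' '] then 5
    else if PySem.Chars.startswith cs ['#', '#', '#', '#', '#', '#', ' '] then 6
    else 0
  if level = 0 then line
  else
    match pvA_scan cs level (PySem.List.pyRange ((level : Int) + 1) (cs.length : Int)) with
    | some out => String.ofList out
    | none => line

-- A only ever reassigns md_content[i] from the value read at index i, so the
-- enumerate-and-assign loop is a per-line map (the returned list).
def remove_md_title_number (md_content : List String) : List String :=
  md_content.map pvA_line

-- ===== PORT B =====
-- B's while loop over j with the state variable becomes one recursive function per state over the
-- remaining characters (line[j:]); '#' * hashes + ' ' is List.replicate hashes '#' ++ [' '].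
-- state 2 (SP): skip spaces; at a non-space (or end) rebuild the line from the counted prefix.
def pvB_sp (hashes : Nat) : List Char → List Char
  | [] => List.replicate hashes '#' ++ [' ']
  | c :: rest =>
      if c ≠ ' ' then List.replicate hashes '#' ++ [' '] ++ (c :: rest)
      else pvB_sp hashes rest

-- state 1 (NUM): skip digits and dots; `continue` re-processes the current char in state SP; end of
-- line in NUM means `return line` (encoded as none = line unchanged).
def pvB_num (hashes : Nat) : List Char → Option (List Char)
  | [] => none
  | c :: rest =>
      if !(PySem.Chars.isdigit c || c == '.') then some (pvB_sp hashes (c :: rest))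
      else pvB_num hashes rest

-- state 0 (HASH): count leading '#'s; a space after 1..6 of them enters NUM, anything else
-- (including end of line) returns the line unchanged (none).
def pvB_hash (hashes : Nat) : List Char → Option (List Char)
  | [] => none
  | c :: rest =>
      if c == '#' then pvB_hash (hashes + 1) rest
      else if c == ' ' ∧ 1 ≤ hashes ∧ hashes ≤ 6 then pvB_num hashes rest
      else none

def pvB_line (line : String) : String :=
  match pvB_hash 0 line.toList with
  | some out => String.ofList out
  | none => line

def remove_md_title_number_alt (md_content : List String) : List String :=
  md_content.map pvB_line

-- ===== PRECONDITION & SPEC =====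
def Spec_remove_md_title_number (md_content : List String) (out : List String) : Prop := out = remove_md_title_number_alt md_content
instance (md_content : List String) (out : List String) : Decidable (Spec_remove_md_title_number md_content out) := by unfold Spec_remove_md_title_number; infer_instance

-- ===== CLAIM (what is proved, stated in full; the proofs are below) =====
def Claim_equal_remove_md_title_number : Prop := ∀ (md_content : List String), Dom_remove_md_title_number md_content → Spec_remove_md_title_number md_content (remove_md_title_number md_content)

-- ===== LEMMAS AND PROOFS =====

theorem pv_pyRange_self (a : Int) : PySem.List.pyRange a a = [] := by
  simp [PySem.List.pyRange]

-- A's scan from index s computes: none if everything from s on is digits/dots, else the prefix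
-- cs[:level+1] followed by the suffix from the first non-digit/dot char, spaces stripped.
theorem pv_scan_fuel (fuel : Nat) : ∀ (cs : List Char) (level s : Nat), cs.length - s = fuel → s ≤ cs.length →
    pvA_scan cs level (PySem.List.pyRange (s : Int) (cs.length : Int)) =
      (if (cs.drop s).dropWhile (fun c => PySem.Chars.isdigit c || c == '.') = [] then none
       else some (cs.take (level + 1) ++
         ((cs.drop s).dropWhile (fun c => PySem.Chars.isdigit c || c == '.')).dropWhile (· == ' '))) := by
  induction fuel with
  | zero =>
    intro cs level s hf hs
    have hse : (s : Int) = (cs.length : Int) := by omega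
    rw [hse, pv_pyRange_self]
    simp [pvA_scan, List.drop_eq_nil_of_le (by omega : cs.length ≤ s)]
  | succ n ih =>
    intro cs level s hf hs
    have h : s < cs.length := by omega
    rw [PySem.List.pyRange_one_cons (by exact_mod_cast h)]
    have hdrop : cs.drop s = cs[s] :: cs.drop (s+1) := (List.getElem_cons_drop h).symm
    show (if !(PySem.Chars.isdigit ((PySem.List.pyGet? cs (s:Int)).getD ' ')) && !(((PySem.List.pyGet? cs (s:Int)).getD ' ') == '.') then _ else pvA_scan cs level _) = _
    have hget : (PySem.List.pyGet? cs (s:Int)).getD ' ' = cs[s] := by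
      simp [PySem.List.pyGet?, PySem.List.pyIdx?, h]
    rw [hget, hdrop]
    by_cases hc : (PySem.Chars.isdigit cs[s] || cs[s] == '.') = true
    · have hcond : (!(PySem.Chars.isdigit cs[s]) && !(cs[s] == '.')) = false := by
        rw [← Bool.not_or, hc]; rfl
      rw [hcond, if_neg (by simp)]
      have hcast : ((s:Int)+1) = (((s+1 : Nat)) : Int) := by push_cast; ring
      rw [hcast, ih cs level (s+1) (by omega) (by omega)]
      simp only [List.dropWhile_cons, hc, if_true]
    · rw [Bool.not_eq_true] at hc
      have hcond : (!(PySem.Chars.isdigit cs[s]) && !(cs[s] == '.')) = true := by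
        rw [← Bool.not_or, hc]; rfl
      have hdw : List.dropWhile (fun c => PySem.Chars.isdigit c || c == '.') (cs[s] :: cs.drop (s+1))
          = cs[s] :: cs.drop (s+1) := by
        rw [List.dropWhile_cons_of_neg]
        simpa using hc
      rw [hcond, if_pos rfl, hdw,
         if_neg (List.cons_ne_nil _ _), ← hdrop,
         PySem.List.slice_from cs (by exact_mod_cast Nat.zero_le s),
         PySem.List.slice_to cs (by positivity : (0:Int) ≤ (level:Int)+1),
         (by omega : ((level:Int)+1).toNat = level+1), (by omega : ((s:Int)).toNat = s)]

def pvHashCount (cs : List Char) : Nat := (cs.takeWhile (fun c => c == '#')).length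

theorem pv_sw (m : Nat) (cs : List Char) :
    PySem.Chars.startswith cs (List.replicate m '#' ++ [' ']) = true ↔
      pvHashCount cs = m ∧ cs[m]? = some ' ' := by
  unfold pvHashCount
  induction m generalizing cs with
  | zero =>
    rw [PySem.Chars.startswith_iff]
    cases cs with
    | nil => simp
    | cons a t =>
      rw [show (List.replicate 0 '#' ++ [' ']) = [' '] by rfl, List.cons_prefix_cons]
      by_cases ha : a = ' '
      · subst ha; simp
      · simp [ha]; exact fun h => ha h.symm
  | succ n ih =>
    cases cs with
    | nil => simp [PySem.Chars.startswith_iff]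
    | cons a t =>
      rw [PySem.Chars.startswith_iff, List.replicate_succ, List.cons_append, List.cons_prefix_cons,
          ← PySem.Chars.startswith_iff, ih]
      by_cases ha : a = '#'
      · subst ha; simp
      · simp [ha]; exact fun h => absurd h.symm ha

theorem pv_drop_hashCount (cs : List Char) :
    cs.drop (pvHashCount cs) = cs.dropWhile (fun c => c == '#') := by
  calc cs.drop (pvHashCount cs)
      = (cs.takeWhile (fun c => c == '#') ++ cs.dropWhile (fun c => c == '#')).drop (pvHashCount cs) := by
        rw [List.takeWhile_append_dropWhile]
    _ = cs.dropWhile (fun c => c == '#') := List.drop_left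
  
theorem pv_take_hashCount (cs : List Char) :
    cs.take (pvHashCount cs) = List.replicate (pvHashCount cs) '#' := by
  have h1 : cs.take (pvHashCount cs) = cs.takeWhile (fun c => c == '#') := by
    calc cs.take (pvHashCount cs)
        = (cs.takeWhile (fun c => c == '#') ++ cs.dropWhile (fun c => c == '#')).take (pvHashCount cs) := by
          rw [List.takeWhile_append_dropWhile]
      _ = cs.takeWhile (fun c => c == '#') := List.take_left
  rw [h1, List.eq_replicate_iff]
  refine ⟨rfl, fun b hb => ?_⟩
  have := List.mem_takeWhile_imp hb
  simpa using this

-- B's SP state = prefix ++ space ++ (suffix with leading spaces dropped)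
theorem pv_sp_eq (h : Nat) (cs : List Char) :
    pvB_sp h cs = List.replicate h '#' ++ ' ' :: cs.dropWhile (· == ' ') := by
  induction cs with
  | nil => simp [pvB_sp]
  | cons c rest ih =>
    by_cases hc : c = ' '
    · subst hc
      rw [pvB_sp, if_neg (by simp), ih, List.dropWhile_cons_of_pos (by simp)]
    · rw [pvB_sp, if_pos hc, List.dropWhile_cons_of_neg (by simpa using hc)]
      simp

-- B's NUM state = drop the digit/dot run, then unchanged (none) iff nothing is left
theorem pv_num_eq (h : Nat) (cs : List Char) :
    pvB_num h cs =
      (if cs.dropWhile (fun c => PySem.Chars.isdigit c || c == '.') = [] then none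
       else some (List.replicate h '#' ++ ' ' ::
         ((cs.dropWhile (fun c => PySem.Chars.isdigit c || c == '.')).dropWhile (· == ' ')))) := by
  induction cs with
  | nil => simp [pvB_num]
  | cons c rest ih =>
    by_cases hc : (PySem.Chars.isdigit c || c == '.') = true
    · rw [pvB_num, if_neg (by simp [hc]), ih]
      simp only [List.dropWhile_cons, hc, if_true]
    · have hc' : (PySem.Chars.isdigit c || c == '.') = false := by
        simpa using hc
      rw [pvB_num, if_pos (by simp [hc']), pv_sp_eq]
      simp only [List.dropWhile_cons, hc', Bool.false_eq_true, if_false]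
      rw [if_neg (List.cons_ne_nil _ _)]

-- B's HASH state characterised by the leading-'#' run
theorem pv_ite_true {α : Type} {b : Bool} (hb : b = true) {x y : α} : (if b = true then x else y) = x := by
  simp [hb]

theorem pv_ite_false {α : Type} {b : Bool} (hb : b = false) {x y : α} : (if b = true then x else y) = y := by
  simp [hb]

theorem pv_hash_eq (cs : List Char) : ∀ (h : Nat),
    pvB_hash h cs =
      (if (cs.dropWhile (fun c => c == '#')).head? = some ' ' ∧
          1 ≤ h + pvHashCount cs ∧ h + pvHashCount cs ≤ 6 then
        pvB_num (h + pvHashCount cs) (cs.dropWhile (fun c => c == '#')).tail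
       else none) := by
  induction cs with
  | nil => intro h; simp [pvB_hash]
  | cons c rest ih =>
    intro h
    by_cases hc : c = '#'
    · subst hc
      rw [pvB_hash, if_pos (show ('#' == '#') = true from rfl), ih (h+1),
          List.dropWhile_cons_of_pos (by simp)]
      have : h + 1 + pvHashCount rest = h + pvHashCount ('#' :: rest) := by
        unfold pvHashCount
        rw [List.takeWhile_cons_of_pos (by simp)]
        simp; omega
      rw [this]
    · have h0 : pvHashCount (c :: rest) = 0 := by
        unfold pvHashCount
        rw [List.takeWhile_cons_of_neg (by simpa using hc)]
        rfl
      rw [pvB_hash, if_neg (by simpa using hc), List.dropWhile_cons_of_neg (by simpa using hc), h0]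
      simp only [List.head?_cons, List.tail_cons, Nat.add_zero]
      by_cases hsp : c = ' '
      · subst hsp
        by_cases hb : 1 ≤ h ∧ h ≤ 6
        · rw [if_pos (show (' ' == ' ') = true ∧ 1 ≤ h ∧ h ≤ 6 from ⟨rfl, hb⟩),
              if_pos (show some ' ' = some ' ' ∧ 1 ≤ h ∧ h ≤ 6 from ⟨rfl, hb⟩)]
        · rw [if_neg (show ¬((' ' == ' ') = true ∧ 1 ≤ h ∧ h ≤ 6) from by rintro ⟨-, b1, b2⟩; exact hb ⟨b1, b2⟩),
              if_neg (show ¬(some ' ' = some ' ' ∧ 1 ≤ h ∧ h ≤ 6) from by rintro ⟨-, b1, b2⟩; exact hb ⟨b1, b2⟩)]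
      · rw [if_neg (show ¬((c == ' ') = true ∧ 1 ≤ h ∧ h ≤ 6) from by rintro ⟨b, -⟩; exact hsp (by simpa using b)),
            if_neg (show ¬(some c = some ' ' ∧ 1 ≤ h ∧ h ≤ 6) from by rintro ⟨b, -⟩; exact hsp (Option.some.inj b))]

theorem pv_line_eq (line : String) : pvA_line line = pvB_line line := by
  simp only [pvA_line, pvB_line]
  rw [pv_hash_eq]
  by_cases hC : 1 ≤ pvHashCount line.toList ∧ pvHashCount line.toList ≤ 6 ∧ line.toList[pvHashCount line.toList]? = some ' '
  · obtain ⟨hc1, hc6, hcs⟩ := hC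
    set cs := line.toList with hcs_def
    obtain ⟨K, hKeq⟩ : ∃ K, pvHashCount cs = K := ⟨_, rfl⟩
    rw [hKeq] at hc1 hc6 hcs ⊢
    have hdropK : cs.drop K = cs.dropWhile (fun c => c == '#') := hKeq ▸ pv_drop_hashCount cs
    have hKlt : K < cs.length := (List.getElem?_eq_some_iff.mp hcs).1
    have hhead : cs.drop K = ' ' :: cs.drop (K+1) := by
      rw [(List.getElem_cons_drop hKlt).symm]
      have : cs[K] = ' ' := (List.getElem?_eq_some_iff.mp hcs).2
      rw [this]
    have hmatch : cs.dropWhile (fun c => c == '#') = ' ' :: cs.drop (K+1) := by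
      rw [← hdropK, hhead]
    rw [hmatch]
    simp only [List.head?_cons, List.tail_cons, Nat.zero_add]
    rw [if_pos (show True ∧ 1 ≤ K ∧ K ≤ 6 from ⟨trivial, hc1, hc6⟩), pv_num_eq]
    have htake : cs.take (K+1) = List.replicate K '#' ++ [' '] := by
      rw [List.take_add_one, ← hKeq, pv_take_hashCount, hKeq, hcs]
      rfl
    have f : ∀ m, ¬ (K = m ∧ cs[m]? = some ' ') → PySem.Chars.startswith cs (List.replicate m '#' ++ [' ']) = false := by
      intro m hm
      rw [← Bool.not_eq_true, pv_sw m cs, hKeq]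
      exact hm
    have hsK : PySem.Chars.startswith cs (List.replicate K '#' ++ [' ']) = true :=
      (pv_sw K cs).mpr ⟨hKeq, hcs⟩
    have hfin : ∀ (lvl : Nat), lvl = K →
        (if lvl = 0 then line
         else match pvA_scan cs lvl (PySem.List.pyRange ((lvl : Int) + 1) (cs.length : Int)) with
           | some out => String.ofList out
           | none => line) =
        (match (if (cs.drop (K+1)).dropWhile (fun c => PySem.Chars.isdigit c || c == '.') = [] then none
           else some (List.replicate K '#' ++ ' ' ::
             ((cs.drop (K+1)).dropWhile (fun c => PySem.Chars.isdigit c || c == '.')).dropWhile (· == ' '))) with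
         | some out => String.ofList out
         | none => line) := by
      intro lvl hlvl
      rw [hlvl]
      rw [if_neg (show ¬ (K = 0) by omega)]
      have hcastK : ((K:Int)+1) = (((K+1:Nat)):Int) := by push_cast; rfl
      rw [hcastK, pv_scan_fuel (cs.length - (K+1)) cs K (K+1) rfl (by omega), htake]
      simp [List.append_assoc]
    interval_cases K
    · have hs : PySem.Chars.startswith cs ['#', ' '] = true := by simpa using hsK
      rw [pv_ite_true hs]
      exact hfin 1 rfl
    · have f1 : PySem.Chars.startswith cs ['#', ' '] = false := by simpa using f 1 (by rintro ⟨h, -⟩; omega)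
      have hs : PySem.Chars.startswith cs ['#', '#', ' '] = true := by simpa using hsK
      rw [pv_ite_false f1, pv_ite_true hs]
      exact hfin 2 rfl
    · have f1 : PySem.Chars.startswith cs ['#', ' '] = false := by simpa using f 1 (by rintro ⟨h, -⟩; omega)
      have f2 : PySem.Chars.startswith cs ['#', '#', ' '] = false := by simpa using f 2 (by rintro ⟨h, -⟩; omega)
      have hs : PySem.Chars.startswith cs ['#', '#', '#', ' '] = true := by simpa using hsK
      rw [pv_ite_false f1, pv_ite_false f2, pv_ite_true hs]
      exact hfin 3 rfl
    · have f1 : PySem.Chars.startswith cs ['#', ' '] = false := by simpa using f 1 (by rintro ⟨h, -⟩; omega)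
      have f2 : PySem.Chars.startswith cs ['#', '#', ' '] = false := by simpa using f 2 (by rintro ⟨h, -⟩; omega)
      have f3 : PySem.Chars.startswith cs ['#', '#', '#', ' '] = false := by simpa using f 3 (by rintro ⟨h, -⟩; omega)
      have hs : PySem.Chars.startswith cs ['#', '#', '#', '#', ' '] = true := by simpa using hsK
      rw [pv_ite_false f1, pv_ite_false f2, pv_ite_false f3, pv_ite_true hs]
      exact hfin 4 rfl
    · have f1 : PySem.Chars.startswith cs ['#', ' '] = false := by simpa using f 1 (by rintro ⟨h, -⟩; omega)
      have f2 : PySem.Chars.startswith cs ['#', '#', ' '] = false := by simpa using f 2 (by rintro ⟨h, -⟩; omega)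
      have f3 : PySem.Chars.startswith cs ['#', '#', '#', ' '] = false := by simpa using f 3 (by rintro ⟨h, -⟩; omega)
      have f4 : PySem.Chars.startswith cs ['#', '#', '#', '#', ' '] = false := by simpa using f 4 (by rintro ⟨h, -⟩; omega)
      have hs : PySem.Chars.startswith cs ['#', '#', '#', '#', '#', ' '] = true := by simpa using hsK
      rw [pv_ite_false f1, pv_ite_false f2, pv_ite_false f3, pv_ite_false f4, pv_ite_true hs]
      exact hfin 5 rfl
    · have f1 : PySem.Chars.startswith cs ['#', ' '] = false := by simpa using f 1 (by rintro ⟨h, -⟩; omega)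
      have f2 : PySem.Chars.startswith cs ['#', '#', ' '] = false := by simpa using f 2 (by rintro ⟨h, -⟩; omega)
      have f3 : PySem.Chars.startswith cs ['#', '#', '#', ' '] = false := by simpa using f 3 (by rintro ⟨h, -⟩; omega)
      have f4 : PySem.Chars.startswith cs ['#', '#', '#', '#', ' '] = false := by simpa using f 4 (by rintro ⟨h, -⟩; omega)
      have f5 : PySem.Chars.startswith cs ['#', '#', '#', '#', '#', ' '] = false := by simpa using f 5 (by rintro ⟨h, -⟩; omega)
      have hs : PySem.Chars.startswith cs ['#', '#', '#', '#', '#', '#', ' '] = true := by simpa using hsK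
      rw [pv_ite_false f1, pv_ite_false f2, pv_ite_false f3, pv_ite_false f4, pv_ite_false f5, pv_ite_true hs]
      exact hfin 6 rfl
  · -- no heading: both sides return line
    set cs := line.toList with hcs_def
    have n : ∀ m, 1 ≤ m → m ≤ 6 → PySem.Chars.startswith cs (List.replicate m '#' ++ [' ']) = false := by
      intro m h1 h6
      rw [← Bool.not_eq_true, pv_sw m cs]
      rintro ⟨hk, hsp⟩
      exact hC ⟨by omega, by omega, hk ▸ hsp⟩
    have n1 : PySem.Chars.startswith cs ['#', ' '] = false := by simpa using n 1 (by omega) (by omega)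
    have n2 : PySem.Chars.startswith cs ['#', '#', ' '] = false := by simpa using n 2 (by omega) (by omega)
    have n3 : PySem.Chars.startswith cs ['#', '#', '#', ' '] = false := by simpa using n 3 (by omega) (by omega)
    have n4 : PySem.Chars.startswith cs ['#', '#', '#', '#', ' '] = false := by simpa using n 4 (by omega) (by omega)
    have n5 : PySem.Chars.startswith cs ['#', '#', '#', '#', '#', ' '] = false := by simpa using n 5 (by omega) (by omega)
    have n6 : PySem.Chars.startswith cs ['#', '#', '#', '#', '#', '#', ' '] = false := by simpa using n 6 (by omega) (by omega)
    rw [pv_ite_false n1, pv_ite_false n2, pv_ite_false n3, pv_ite_false n4, pv_ite_false n5, pv_ite_false n6,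
        if_pos rfl]
    have hcond : ¬ ((cs.dropWhile (fun c => c == '#')).head? = some ' ' ∧
        1 ≤ 0 + pvHashCount cs ∧ 0 + pvHashCount cs ≤ 6) := by
      rintro ⟨hhead, hb1, hb2⟩
      have hget : cs[pvHashCount cs]? = some ' ' := by
        rw [← pv_drop_hashCount cs] at hhead
        rw [← List.head?_drop]
        exact hhead
      exact hC ⟨by omega, by omega, hget⟩
    rw [if_neg hcond]

-- ===== VERDICT (by name: the statement is the Claim_ definition above) =====
theorem remove_md_title_number_spec : Claim_equal_remove_md_title_number := by
  intro md _
  unfold Spec_remove_md_title_number remove_md_title_number remove_md_title_number_alt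
  exact List.map_congr_left (fun s _ => pv_line_eq s)
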